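-- pv_equiv track=rewrite | github.com/gavin-ho1/wharton-investing-comp | src/portfolio_optimization.py | classify_stocks_by_market_cap
-- ===== SOURCE A (Python) =====
-- def classify_stocks_by_market_cap(tickers, fundamentals_data, cap_threshold, etf_list):
--     """Classifies stocks into large-cap and small/mid-cap groups, forcing ETFs into large-cap."""
--     large_caps, small_mid_caps = [], []
--     cap_groups = {}
--     for ticker in tickers:
--         if ticker in etf_list:
--             large_caps.append(ticker)
--             cap_groups[ticker] = 'Large-Cap'
--             continue
--         try:
--             market_cap = fundamentals_data[ticker]['info'].get('marketCap')
--             if market_cap is None: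
--                 continue
--             if market_cap >= cap_threshold:
--                 large_caps.append(ticker)
--                 cap_groups[ticker] = 'Large-Cap'
--             else:
--                 small_mid_caps.append(ticker)
--                 cap_groups[ticker] = 'Small/Mid-Cap'
--         except KeyError:
--             continue
--     return large_caps, small_mid_caps, cap_groups
-- ===== SOURCE B (Python) =====
-- def classify_stocks_by_market_cap(tickers, fundamentals_data, cap_threshold, etf_list):
--     """Pure per-ticker classifier evaluated once into a labels list; all three outputs
--     are then derived declaratively by comprehensions over the (ticker, label) pairs."""
--     def label(t):
--         if t in etf_list:
--             return 'Large-Cap'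
--         entry = fundamentals_data.get(t)
--         if entry is None:
--             return None
--         info = entry.get('info')
--         if info is None:
--             return None
--         mc = info.get('marketCap')
--         if mc is None:
--             return None
--         return 'Large-Cap' if mc >= cap_threshold else 'Small/Mid-Cap'
--     labels = [label(t) for t in tickers]
--     large_caps = [t for t, c in zip(tickers, labels) if c == 'Large-Cap']
--     small_mid_caps = [t for t, c in zip(tickers, labels) if c == 'Small/Mid-Cap']
--     cap_groups = {t: c for t, c in zip(tickers, labels) if c is not None}
--     return large_caps, small_mid_caps, cap_groups
-- ===== Notes on version B (the rewrite author's own statement) =====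
-- stated objective: alternative
-- what changed: A is one imperative loop with try/except mutating three accumulators; B factors classification into a pure total per-ticker function, evaluates it once into a labels list, and derives all three outputs as independent comprehensions (incl. a dict comprehension) over the zipped (ticker, label) pairs.
import Mathlib
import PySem

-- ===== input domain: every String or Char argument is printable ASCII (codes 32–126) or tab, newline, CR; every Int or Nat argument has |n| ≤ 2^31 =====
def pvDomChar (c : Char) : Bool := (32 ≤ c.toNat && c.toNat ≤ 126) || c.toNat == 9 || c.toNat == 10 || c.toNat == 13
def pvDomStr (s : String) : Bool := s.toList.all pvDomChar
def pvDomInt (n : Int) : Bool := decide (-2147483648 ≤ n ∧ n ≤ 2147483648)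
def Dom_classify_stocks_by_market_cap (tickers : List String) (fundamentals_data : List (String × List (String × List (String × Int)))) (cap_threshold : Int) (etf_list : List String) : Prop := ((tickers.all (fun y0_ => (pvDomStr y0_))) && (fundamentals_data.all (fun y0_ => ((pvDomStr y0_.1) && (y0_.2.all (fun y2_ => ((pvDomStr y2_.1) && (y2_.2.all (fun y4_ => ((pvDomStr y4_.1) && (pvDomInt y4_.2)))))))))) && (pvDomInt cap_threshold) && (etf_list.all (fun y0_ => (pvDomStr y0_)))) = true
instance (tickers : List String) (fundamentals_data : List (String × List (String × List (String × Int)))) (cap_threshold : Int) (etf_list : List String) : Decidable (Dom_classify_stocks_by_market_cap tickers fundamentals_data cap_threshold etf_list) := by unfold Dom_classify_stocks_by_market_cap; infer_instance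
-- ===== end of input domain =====

-- B replaces A's single imperative loop (try/except, three mutable accumulators) by a pure
-- per-ticker classifier evaluated once into a labels list, from which all three outputs are
-- derived as independent comprehensions over the zipped (ticker, label) pairs (alternative decomposition, same cost).

-- ===== PORT A =====
def classify_stocks_by_market_cap (tickers : List String) (fundamentals_data : List (String × List (String × List (String × Int)))) (cap_threshold : Int) (etf_list : List String) : List String × List String × (List (String × String)) :=
  let r := tickers.foldl (fun (st : List String × List String × PySem.Dict String String) ticker =>
    if etf_list.contains ticker then
      (st.1 ++ [ticker], st.2.1, st.2.2.insert ticker "Large-Cap")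
    else
      match (PySem.Dict.mk fundamentals_data).get? ticker with
      | none => st    -- KeyError on fundamentals_data[ticker]: continue
      | some entry =>
        match (PySem.Dict.mk entry).get? "info" with
        | none => st  -- KeyError on ['info']: continue
        | some info =>
          match (PySem.Dict.mk info).get? "marketCap" with
          | none => st  -- market_cap is None: continue
          | some market_cap =>
            if market_cap ≥ cap_threshold then
              (st.1 ++ [ticker], st.2.1, st.2.2.insert ticker "Large-Cap")
            else
              (st.1, st.2.1 ++ [ticker], st.2.2.insert ticker "Small/Mid-Cap"))
    ([], [], PySem.Dict.empty)
  (r.1, r.2.1, r.2.2.items)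

-- ===== PORT B =====
-- B's nested pure helper `label`
def classify_stocks_by_market_cap_label (fundamentals_data : List (String × List (String × List (String × Int)))) (cap_threshold : Int) (etf_list : List String) (t : String) : Option String :=
  if etf_list.contains t then some "Large-Cap"
  else
    match (PySem.Dict.mk fundamentals_data).get? t with
    | none => none
    | some entry =>
      match (PySem.Dict.mk entry).get? "info" with
      | none => none
      | some info =>
        match (PySem.Dict.mk info).get? "marketCap" with
        | none => none
        | some mc =>
          some (if mc ≥ cap_threshold then "Large-Cap" else "Small/Mid-Cap")

def classify_stocks_by_market_cap_alt (tickers : List String) (fundamentals_data : List (String × List (String × List (String × Int)))) (cap_threshold : Int) (etf_list : List String) : List String × List String × (List (String × String)) :=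
  let labels := tickers.map (classify_stocks_by_market_cap_label fundamentals_data cap_threshold etf_list)
  let large_caps := ((tickers.zip labels).filter (fun p => p.2 == some "Large-Cap")).map Prod.fst
  let small_mid_caps := ((tickers.zip labels).filter (fun p => p.2 == some "Small/Mid-Cap")).map Prod.fst
  -- dict comprehension {t: c for t, c in zip(tickers, labels) if c is not None}
  let cap_groups := (tickers.zip labels).foldl (fun (d : PySem.Dict String String) p =>
      match p.2 with
      | some c => d.insert p.1 c
      | none => d) PySem.Dict.empty
  (large_caps, small_mid_caps, cap_groups.items)

-- ===== PRECONDITION & SPEC =====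
def Spec_classify_stocks_by_market_cap (tickers : List String) (fundamentals_data : List (String × List (String × List (String × Int)))) (cap_threshold : Int) (etf_list : List String) (out : List String × List String × (List (String × String))) : Prop := out = classify_stocks_by_market_cap_alt tickers fundamentals_data cap_threshold etf_list
instance (tickers : List String) (fundamentals_data : List (String × List (String × List (String × Int)))) (cap_threshold : Int) (etf_list : List String) (out : List String × List String × (List (String × String))) : Decidable (Spec_classify_stocks_by_market_cap tickers fundamentals_data cap_threshold etf_list out) := by unfold Spec_classify_stocks_by_market_cap; infer_instance

-- ===== CLAIM (what is proved, stated in full; the proofs are below) =====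
def Claim_equal_classify_stocks_by_market_cap : Prop := ∀ (tickers : List String) (fundamentals_data : List (String × List (String × List (String × Int)))) (cap_threshold : Int) (etf_list : List String), Dom_classify_stocks_by_market_cap tickers fundamentals_data cap_threshold etf_list → Spec_classify_stocks_by_market_cap tickers fundamentals_data cap_threshold etf_list (classify_stocks_by_market_cap tickers fundamentals_data cap_threshold etf_list)

-- ===== LEMMAS AND PROOFS =====

-- A's loop step, literally the lambda of port A
def pvStepA (fundamentals_data : List (String × List (String × List (String × Int)))) (cap_threshold : Int) (etf_list : List String) (st : List String × List String × PySem.Dict String String) (ticker : String) : List String × List String × PySem.Dict String String :=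
  if etf_list.contains ticker then
    (st.1 ++ [ticker], st.2.1, st.2.2.insert ticker "Large-Cap")
  else
    match (PySem.Dict.mk fundamentals_data).get? ticker with
    | none => st
    | some entry =>
      match (PySem.Dict.mk entry).get? "info" with
      | none => st
      | some info =>
        match (PySem.Dict.mk info).get? "marketCap" with
        | none => st
        | some market_cap =>
          if market_cap ≥ cap_threshold then
            (st.1 ++ [ticker], st.2.1, st.2.2.insert ticker "Large-Cap")
          else
            (st.1, st.2.1 ++ [ticker], st.2.2.insert ticker "Small/Mid-Cap")

-- A's dict update expressed through B's pure classifier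
def pvStepD (fundamentals_data : List (String × List (String × List (String × Int)))) (cap_threshold : Int) (etf_list : List String) (g : PySem.Dict String String) (t : String) : PySem.Dict String String :=
  match classify_stocks_by_market_cap_label fundamentals_data cap_threshold etf_list t with
  | some c => g.insert t c
  | none => g

lemma pvStepA_eq (fd : List (String × List (String × List (String × Int)))) (thr : Int) (etfs : List String) (st : List String × List String × PySem.Dict String String) (t : String) :
    pvStepA fd thr etfs st t =
      (st.1 ++ (if classify_stocks_by_market_cap_label fd thr etfs t == some "Large-Cap" then [t] else []),
       st.2.1 ++ (if classify_stocks_by_market_cap_label fd thr etfs t == some "Small/Mid-Cap" then [t] else []),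
       pvStepD fd thr etfs st.2.2 t) := by
  unfold pvStepA
  cases h : etfs.contains t
  · have h' : ¬ t ∈ etfs := by simpa using h
    simp only [Bool.false_eq_true, if_false]
    cases he : (PySem.Dict.mk fd).get? t with
    | none => simp [classify_stocks_by_market_cap_label, pvStepD, h', he]
    | some entry =>
      simp only []
      cases hi : (PySem.Dict.mk entry).get? "info" with
      | none => simp [classify_stocks_by_market_cap_label, pvStepD, h', he, hi]
      | some info =>
        simp only []
        cases hm : (PySem.Dict.mk info).get? "marketCap" with
        | none => simp [classify_stocks_by_market_cap_label, pvStepD, h', he, hi, hm]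
        | some mc =>
          by_cases hge : mc ≥ thr <;>
            simp [classify_stocks_by_market_cap_label, pvStepD, h', he, hi, hm, hge]
  · have h' : t ∈ etfs := by simpa using h
    simp [classify_stocks_by_market_cap_label, pvStepD, h']

lemma pvFoldA_eq (fd : List (String × List (String × List (String × Int)))) (thr : Int) (etfs : List String) (xs : List String) (L S : List String) (g : PySem.Dict String String) :
    xs.foldl (pvStepA fd thr etfs) (L, S, g) =
    (L ++ xs.filter (fun t => classify_stocks_by_market_cap_label fd thr etfs t == some "Large-Cap"),
     S ++ xs.filter (fun t => classify_stocks_by_market_cap_label fd thr etfs t == some "Small/Mid-Cap"),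
     xs.foldl (pvStepD fd thr etfs) g) := by
  induction xs generalizing L S g with
  | nil => simp
  | cons x xs ih =>
    rw [List.foldl_cons, pvStepA_eq, ih, List.foldl_cons]
    simp only [List.filter_cons, List.append_assoc]
    refine Prod.ext ?_ (Prod.ext ?_ rfl)
    · cases classify_stocks_by_market_cap_label fd thr etfs x == some "Large-Cap" <;> simp
    · cases classify_stocks_by_market_cap_label fd thr etfs x == some "Small/Mid-Cap" <;> simp

-- filtering zipped (x, f x) pairs on the label and projecting = filtering xs on f
lemma pvZipFilterMap {α β : Type} [BEq β] [LawfulBEq β] (f : α → β) (c : β) (xs : List α) :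
    (((xs.zip (xs.map f)).filter (fun p => p.2 == c)).map Prod.fst) =
      xs.filter (fun t => f t == c) := by
  induction xs with
  | nil => rfl
  | cons x xs ih =>
    simp only [List.map_cons, List.zip_cons_cons, List.filter_cons]
    cases h : f x == c <;> simp [h, ih]

-- folding over zipped (x, f x) pairs = folding over xs applying f in the step
lemma pvZipFold {α β γ : Type} (f : α → β) (s : γ → α × β → γ) (xs : List α) (g : γ) :
    (xs.zip (xs.map f)).foldl s g = xs.foldl (fun g x => s g (x, f x)) g := by
  induction xs generalizing g with
  | nil => rfl
  | cons x xs ih => simp [ih]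

-- ===== VERDICT (by name: the statement is the Claim_ definition above) =====
theorem classify_stocks_by_market_cap_spec : Claim_equal_classify_stocks_by_market_cap := by
  intro tickers fd thr etfs _
  show ((tickers.foldl (pvStepA fd thr etfs) ([], [], PySem.Dict.empty)).1,
        (tickers.foldl (pvStepA fd thr etfs) ([], [], PySem.Dict.empty)).2.1,
        (tickers.foldl (pvStepA fd thr etfs) ([], [], PySem.Dict.empty)).2.2.items) =
       classify_stocks_by_market_cap_alt tickers fd thr etfs
  rw [pvFoldA_eq]
  have hstep : (fun (g : PySem.Dict String String) (x : String) =>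
      match classify_stocks_by_market_cap_label fd thr etfs x with
      | some c => g.insert x c
      | none => g) = pvStepD fd thr etfs := by
    funext g x; rfl
  simp only [classify_stocks_by_market_cap_alt, pvZipFilterMap, pvZipFold, List.nil_append, hstep]
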